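-- pv_equiv track=rewrite | github.com/jad-b/Crank | crank/util/stream.py | buffer_data
-- ===== SOURCE A (Python) =====
-- def buffer_data(source, delim='\n'):
--     """Group data into a stream of lists."""
--     bfr = []
--     for line in source:
--         if line == delim or not line:  # newline or empty string
--             if bfr:  # if there's something there
--                 yield list(bfr)  # Return copy of buffer
--                 bfr.clear()
--         else:
--             bfr.append(line.strip())
--     if bfr:
--         yield bfr
-- ===== SOURCE B (Python) =====
-- def buffer_data(source, delim='\n'):
--     """Group data into a stream of lists (run-splitting re-implementation)."""
--     rest = list(source)
--     while rest:
--         if rest[0] == delim or not rest[0]: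
--             rest = rest[1:]
--         else:
--             k = 1
--             while k < len(rest) and rest[k] != delim and rest[k]:
--                 k += 1
--             yield [l.strip() for l in rest[:k]]
--             rest = rest[k:]
-- ===== Notes on version B (the rewrite author's own statement) =====
-- stated objective: alternative
-- what changed: Replaces A's buffer/clear state machine (with a post-loop flush) by run-splitting: scan forward to the end of each maximal non-delimiter run, yield that slice stripped, and continue on the remainder, so no buffer state or trailing flush exists.
import Mathlib
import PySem

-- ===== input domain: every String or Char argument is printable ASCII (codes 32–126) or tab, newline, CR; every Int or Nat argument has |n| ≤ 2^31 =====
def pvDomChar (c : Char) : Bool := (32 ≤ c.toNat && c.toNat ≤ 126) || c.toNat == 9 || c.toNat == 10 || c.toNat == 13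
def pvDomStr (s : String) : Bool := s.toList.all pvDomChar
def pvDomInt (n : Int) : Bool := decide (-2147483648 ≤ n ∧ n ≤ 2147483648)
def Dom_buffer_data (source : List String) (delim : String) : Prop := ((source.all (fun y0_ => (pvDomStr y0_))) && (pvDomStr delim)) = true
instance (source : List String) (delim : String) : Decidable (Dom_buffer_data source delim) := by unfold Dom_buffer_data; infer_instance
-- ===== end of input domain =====

-- B replaces A's buffer/clear state machine with run-splitting over the list (alternative decomposition, same results).

-- ===== PORT A =====
-- literal port of A: fold the buffer state machine over the lines, then the post-loop flush
def buffer_data (source : List String) (delim : String) : List (List String) :=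
  let step := fun (acc : List (List String) × List String) (line : String) =>
    if line == delim || line == "" then            -- newline or empty string
      if acc.2.isEmpty then acc else (acc.1 ++ [acc.2], ([] : List String))
    else (acc.1, acc.2 ++ [PySem.Str.strip line])
  let r := source.foldl step ([], [])
  if r.2.isEmpty then r.1 else r.1 ++ [r.2]

-- ===== PORT B =====
-- inner while loop of B: advance k while rest[k] is a non-delimiter, non-empty line
def pvRunLen (delim : String) (rest : List String) (k : Nat) : Nat :=
  if h : k < rest.length then
    if !(rest[k] == delim) && !(rest[k] == "") then pvRunLen delim rest (k + 1) else k
  else k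
termination_by rest.length - k

theorem pvRunLen_ge (delim : String) (rest : List String) (k : Nat) :
    k ≤ pvRunLen delim rest k := by
  induction k using pvRunLen.induct (delim := delim) (rest := rest) with
  | case1 k h hp ih => rw [pvRunLen]; simp only [h, hp, dif_pos, if_pos]; omega
  | case2 k h hp => rw [pvRunLen]; simp [h, hp]
  | case3 k h => rw [pvRunLen]; simp [h]

-- outer while loop of B: recursion on the remaining suffix `rest`; rest[:k]/rest[k:] are take/drop (k is in range)
def pvSplitRuns (delim : String) : List String → List (List String)
  | [] => []
  | h :: t =>
    if h == delim || h == "" then pvSplitRuns delim t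
    else
      let k := pvRunLen delim (h :: t) 1
      ((h :: t).take k).map PySem.Str.strip :: pvSplitRuns delim ((h :: t).drop k)
termination_by rest => rest.length
decreasing_by
  · simp
  · have := pvRunLen_ge delim (h :: t) 1
    simp [List.length_drop]; omega

def buffer_data_alt (source : List String) (delim : String) : List (List String) :=
  pvSplitRuns delim source

-- ===== PRECONDITION & SPEC =====
def Spec_buffer_data (source : List String) (delim : String) (out : List (List String)) : Prop := out = buffer_data_alt source delim
instance (source : List String) (delim : String) (out : List (List String)) : Decidable (Spec_buffer_data source delim out) := by unfold Spec_buffer_data; infer_instance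

-- ===== CLAIM (what is proved, stated in full; the proofs are below) =====
def Claim_equal_buffer_data : Prop := ∀ (source : List String) (delim : String), Dom_buffer_data source delim → Spec_buffer_data source delim (buffer_data source delim)

-- ===== LEMMAS AND PROOFS =====

-- A's generator, rewritten as structural recursion on the remaining input with the pending buffer as parameter
def pvG (delim : String) : List String → List String → List (List String)
  | bfr, [] => if bfr.isEmpty then [] else [bfr]
  | bfr, l :: t =>
    if l == delim || l == "" then
      if bfr.isEmpty then pvG delim [] t else bfr :: pvG delim [] t
    else pvG delim (bfr ++ [PySem.Str.strip l]) t

theorem pvFold_eq_pvG (delim : String) (rest : List String) :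
    ∀ (out : List (List String)) (bfr : List String),
    (let r := rest.foldl (fun (acc : List (List String) × List String) (line : String) =>
        if line == delim || line == "" then
          if acc.2.isEmpty then acc else (acc.1 ++ [acc.2], ([] : List String))
        else (acc.1, acc.2 ++ [PySem.Str.strip line])) (out, bfr);
      if r.2.isEmpty then r.1 else r.1 ++ [r.2]) = out ++ pvG delim bfr rest := by
  induction rest with
  | nil => intro out bfr; by_cases hb : bfr.isEmpty <;> simp [pvG, hb]
  | cons l t ih =>
    intro out bfr
    by_cases hl : l = delim ∨ l = ""
    · by_cases hb : bfr = []
      · simpa [pvG, hl, hb] using ih out bfr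
      · have := ih (out ++ [bfr]) []
        simp [pvG, hl, hb] at this ⊢
        simpa using this
    · simpa [pvG, hl] using ih out (bfr ++ [PySem.Str.strip l])

theorem pvRunLen_eq (delim : String) (rest : List String) (k : Nat) :
    pvRunLen delim rest k =
      k + ((rest.drop k).takeWhile (fun x => !(x == delim) && !(x == ""))).length := by
  induction k using pvRunLen.induct (delim := delim) (rest := rest) with
  | case1 k h hp ih =>
    rw [pvRunLen]
    rw [List.drop_eq_getElem_cons h]
    simp only [h, hp, dif_pos, if_pos, ih, List.takeWhile_cons, List.length_cons]
    omega
  | case2 k h hp =>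
    rw [pvRunLen]
    rw [List.drop_eq_getElem_cons h]
    simp [h, hp]
  | case3 k h =>
    rw [pvRunLen]
    have : rest.drop k = [] := List.drop_eq_nil_of_le (by omega)
    simp [h, this]

theorem pv_drop_takeWhile {α : Type} (p : α → Bool) (u : List α) :
    u.drop ((u.takeWhile p).length) = u.dropWhile p := by
  induction u with
  | nil => simp
  | cons a u ih =>
    by_cases hp : p a = true <;> simp [List.takeWhile_cons, List.dropWhile_cons, hp, ih]

theorem pvG_eq_splitRuns (delim : String) :
    ∀ (n : Nat) (rest : List String), rest.length ≤ n →
    (pvG delim [] rest = pvSplitRuns delim rest) ∧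
    (∀ bfr : List String, bfr ≠ [] →
      pvG delim bfr rest =
        (bfr ++ (rest.takeWhile (fun x => !(x == delim) && !(x == ""))).map PySem.Str.strip)
          :: pvSplitRuns delim (rest.dropWhile (fun x => !(x == delim) && !(x == "")))) := by
  intro n
  induction n with
  | zero =>
    intro rest hlen
    have : rest = [] := List.eq_nil_of_length_eq_zero (by omega)
    subst this
    refine ⟨by simp [pvG, pvSplitRuns], ?_⟩
    intro bfr hb
    simp [pvG, pvSplitRuns, List.isEmpty_iff, hb]
  | succ n ih =>
    intro rest hlen
    cases rest with
    | nil =>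
      refine ⟨by simp [pvG, pvSplitRuns], ?_⟩
      intro bfr hb
      simp [pvG, pvSplitRuns, List.isEmpty_iff, hb]
    | cons l t =>
      have ht : t.length ≤ n := by simpa using Nat.lt_succ_iff.mp (by simpa using hlen)
      by_cases hl : (l == delim || l == "") = true
      · -- l is a delimiter / empty line
        have hpl : (!(l == delim) && !(l == "")) = false := by
          cases h1 : (l == delim) <;> cases h2 : (l == "") <;> simp_all
        constructor
        · simp [pvG, hl, pvSplitRuns, (ih t ht).1]
        · intro bfr hb
          simp [pvG, hl, List.isEmpty_iff, hb, List.takeWhile, List.dropWhile, hpl,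
            pvSplitRuns, (ih t ht).1]
      · -- l starts (or continues) a run
        have hpl : (!(l == delim) && !(l == "")) = true := by
          cases h1 : (l == delim) <;> cases h2 : (l == "") <;> simp_all
        have hrun : pvRunLen delim (l :: t) 1 =
            1 + (t.takeWhile (fun x => !(x == delim) && !(x == ""))).length := by
          simpa using pvRunLen_eq delim (l :: t) 1
        have htw : t.take (t.takeWhile (fun x => !(x == delim) && !(x == ""))).length
            = t.takeWhile (fun x => !(x == delim) && !(x == "")) :=
          (List.prefix_iff_eq_take.mp (List.takeWhile_prefix _)).symm
        have hdw := pv_drop_takeWhile (fun x => !(x == delim) && !(x == "")) t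
        constructor
        · have h2 := (ih t ht).2 [PySem.Str.strip l] (by simp)
          simp only [pvG, hl, if_false, Bool.false_eq_true]
          rw [show (([] : List String) ++ [PySem.Str.strip l]) = [PySem.Str.strip l] by simp,
            h2]
          rw [pvSplitRuns]
          simp only [hl, if_false, Bool.false_eq_true, hrun, Nat.add_comm 1,
            List.take_succ_cons, List.drop_succ_cons, hdw]
          rw [htw]
          simp
        · intro bfr hb
          have h2 := (ih t ht).2 (bfr ++ [PySem.Str.strip l]) (by simp)
          simp only [pvG, hl, if_false, Bool.false_eq_true, h2]
          simp [List.takeWhile, List.dropWhile, hpl]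

-- ===== VERDICT (by name: the statement is the Claim_ definition above) =====
theorem buffer_data_spec : Claim_equal_buffer_data := by
  intro source delim _
  unfold Spec_buffer_data buffer_data buffer_data_alt
  have h := pvFold_eq_pvG delim source [] []
  simp only [] at h ⊢
  rw [h]
  simpa using (pvG_eq_splitRuns delim source.length source (le_refl _)).1
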